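-- pv_equiv track=rewrite | github.com/iozdas01/interoperability-poc-1 | dxf-execute/dxf-filler - position.py | _find_layer_by_index
-- ===== SOURCE A (Python) =====
-- from typing import Dict, List, Union
--
-- def _find_layer_by_index(lines: List[str], index: int) -> tuple[int, int]:
--     """Find the start and end indices of a layer by its position in the LAYER table.
--
--     Returns:
--         tuple of (start_index, name_index) where:
--         - start_index is the start of the LAYER record (0\nLAYER)
--         - name_index is the position of the layer name (2\nNAME)
--     """
--     current_index = -1
--     for i in range(len(lines) - 1):
--         if lines[i] == "0" and lines[i + 1].upper() == "LAYER":
--             current_index += 1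
--             if current_index == index:
--                 # Found the layer, now find its name
--                 for j in range(i, min(i + 20, len(lines) - 1)):
--                     if lines[j] == "2":  # Group code for layer name
--                         return i, j
--     return -1, -1
-- ===== SOURCE B (Python) =====
-- def _find_layer_by_index(lines, index):
--     # Build the list of all LAYER record start positions first, then look up the
--     # requested one and search its 20-line window for the name group code "2".
--     starts = [i for i in range(len(lines) - 1)
--               if lines[i] == "0" and lines[i + 1].upper() == "LAYER"]
--     if index < 0 or index >= len(starts):
--         return -1, -1
--     i = starts[index]
--     for j in range(i, min(i + 20, len(lines) - 1)):
--         if lines[j] == "2":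
--             return i, j
--     return -1, -1
-- ===== Notes on version B (the rewrite author's own statement) =====
-- stated objective: simpler
-- what changed: Replaces the fused count-while-scanning loop (counter starting at -1, early return buried two loops deep) with a two-phase decomposition: first build the list of all LAYER start positions, then bounds-check the index and run a single separate name-lookup loop over the 20-line window.
import Mathlib
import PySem

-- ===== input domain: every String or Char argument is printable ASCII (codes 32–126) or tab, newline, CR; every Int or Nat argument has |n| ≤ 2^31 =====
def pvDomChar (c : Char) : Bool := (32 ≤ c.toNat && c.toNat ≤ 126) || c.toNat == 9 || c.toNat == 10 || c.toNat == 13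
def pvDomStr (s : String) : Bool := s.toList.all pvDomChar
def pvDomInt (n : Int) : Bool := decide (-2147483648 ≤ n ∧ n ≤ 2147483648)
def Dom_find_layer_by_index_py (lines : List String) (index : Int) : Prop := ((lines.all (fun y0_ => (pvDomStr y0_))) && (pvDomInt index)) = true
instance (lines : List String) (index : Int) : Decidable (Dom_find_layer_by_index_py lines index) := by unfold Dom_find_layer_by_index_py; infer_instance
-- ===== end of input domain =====

-- B changes the decomposition only: an index-build phase plus a separate name-lookup
-- phase instead of A's fused counting scan; same asymptotic cost, no speed claim.

-- `lines[i] == "0" and lines[i+1].upper() == "LAYER"` (all indices used are in range,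
-- so `getD` is exact here). Both Pythons contain this very condition.
def pvLayerStart (lines : List String) (i : Nat) : Bool :=
  (lines.getD i "" == "0") && (PySem.Str.upper (lines.getD (i+1) "") == "LAYER")

-- the inner loop `for j in range(i, min(i+20, len(lines)-1)): if lines[j] == "2": return i, j`,
-- which appears verbatim in both Pythons; `none` = the loop fell through.
def pvWindowSearch (lines : List String) (i : Nat) (js : List Nat) : Option (Int × Int) :=
  match js with
  | [] => none
  | j :: rest =>
      if lines.getD j "" == "2" then some ((i : Int), (j : Int))
      else pvWindowSearch lines i rest

-- ===== PORT A =====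
-- A's outer `for i in range(len(lines)-1)` with the running counter `current_index`.
def pvAOuter (lines : List String) (index : Int) (is_ : List Nat) (cur : Int) : Int × Int :=
  match is_ with
  | [] => (-1, -1)
  | i :: rest =>
      if pvLayerStart lines i then
        if cur + 1 = index then
          match pvWindowSearch lines i (List.range' i (min (i+20) (lines.length - 1) - i)) with
          | some p => p
          | none => pvAOuter lines index rest (cur + 1)
        else pvAOuter lines index rest (cur + 1)
      else pvAOuter lines index rest cur

def find_layer_by_index_py (lines : List String) (index : Int) : Int × Int :=
  pvAOuter lines index (List.range (lines.length - 1)) (-1)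

-- ===== PORT B =====
def find_layer_by_index_py_alt (lines : List String) (index : Int) : Int × Int :=
  let starts := (List.range (lines.length - 1)).filter (pvLayerStart lines)
  if index < 0 ∨ (starts.length : Int) ≤ index then (-1, -1)
  else
    let i := starts.getD index.toNat 0
    match pvWindowSearch lines i (List.range' i (min (i+20) (lines.length - 1) - i)) with
    | some p => p
    | none => (-1, -1)

-- ===== PRECONDITION & SPEC =====
def Spec_find_layer_by_index_py (lines : List String) (index : Int) (out : Int × Int) : Prop := out = find_layer_by_index_py_alt lines index
instance (lines : List String) (index : Int) (out : Int × Int) : Decidable (Spec_find_layer_by_index_py lines index out) := by unfold Spec_find_layer_by_index_py; infer_instance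

-- ===== CLAIM (what is proved, stated in full; the proofs are below) =====
def Claim_equal_find_layer_by_index_py : Prop := ∀ (lines : List String) (index : Int), Dom_find_layer_by_index_py lines index → Spec_find_layer_by_index_py lines index (find_layer_by_index_py lines index)

-- ===== LEMMAS AND PROOFS =====

-- B's tail (bounds check + lookup + window search) as a function of the start list.
def pvBOf (lines : List String) (starts : List Nat) (k : Int) : Int × Int :=
  if k < 0 ∨ (starts.length : Int) ≤ k then (-1, -1)
  else
    match pvWindowSearch lines (starts.getD k.toNat 0)
        (List.range' (starts.getD k.toNat 0) (min ((starts.getD k.toNat 0)+20) (lines.length - 1) - (starts.getD k.toNat 0))) with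
    | some p => p
    | none => (-1, -1)

lemma pvBOf_nil (lines : List String) (k : Int) : pvBOf lines [] k = (-1, -1) := by
  unfold pvBOf
  rw [if_pos]
  simp only [List.length_nil, Nat.cast_zero]
  omega

lemma pvBOf_cons_ne (lines : List String) (i : Nat) (s : List Nat) (k : Int) (hk : k ≠ 0) :
    pvBOf lines (i :: s) k = pvBOf lines s (k - 1) := by
  unfold pvBOf
  by_cases h1 : k - 1 < 0 ∨ ((s.length : Int) ≤ k - 1)
  · have h0 : k < 0 ∨ (((i :: s).length : Int) ≤ k) := by
      rcases h1 with h | h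
      · left; omega
      · right; simp only [List.length_cons]; push_cast; omega
    rw [if_pos h0, if_pos h1]
  · rcases not_or.mp h1 with ⟨ha, hb⟩
    have h0 : ¬ (k < 0 ∨ (((i :: s).length : Int) ≤ k)) := by
      refine not_or.mpr ⟨by omega, ?_⟩
      simp only [List.length_cons]; push_cast; omega
    rw [if_neg h0, if_neg h1]
    have hget : (i :: s).getD k.toNat 0 = s.getD (k - 1).toNat 0 := by
      have hsucc : k.toNat = (k - 1).toNat + 1 := by omega
      rw [hsucc]
      simp [List.getD]
    rw [hget]

lemma pvBOf_cons_zero (lines : List String) (i : Nat) (s : List Nat) :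
    pvBOf lines (i :: s) 0 =
      (match pvWindowSearch lines i (List.range' i (min (i+20) (lines.length - 1) - i)) with
       | some p => p
       | none => (-1, -1)) := by
  unfold pvBOf
  rw [if_neg]
  · simp [List.getD]
  · refine not_or.mpr ⟨by omega, ?_⟩
    simp only [List.length_cons]; push_cast; omega

lemma pvBOf_neg_one (lines : List String) (s : List Nat) : pvBOf lines s (-1) = (-1, -1) := by
  unfold pvBOf
  rw [if_pos (Or.inl (by omega))]

lemma pvAOuter_eq (lines : List String) (index : Int) (is_ : List Nat) (cur : Int) :
    pvAOuter lines index is_ cur =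
      pvBOf lines (is_.filter (pvLayerStart lines)) (index - cur - 1) := by
  induction is_ generalizing cur with
  | nil => simp [pvAOuter, pvBOf_nil]
  | cons i rest ih =>
    by_cases hP : pvLayerStart lines i
    · by_cases hc : cur + 1 = index
      · have hk : index - cur - 1 = 0 := by omega
        simp only [pvAOuter, hP, if_true, hc, List.filter_cons, hk, pvBOf_cons_zero]
        cases hws : pvWindowSearch lines i (List.range' i (min (i+20) (lines.length - 1) - i)) with
        | some p => simp
        | none =>
            simp only []
            rw [ih index]
            have h2 : index - index - 1 = -1 := by omega
            rw [h2, pvBOf_neg_one]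
      · have hk : index - cur - 1 ≠ 0 := by omega
        simp only [pvAOuter, hP, if_true, if_neg hc, List.filter_cons]
        rw [ih (cur + 1), pvBOf_cons_ne _ _ _ _ hk]
        congr 1; omega
    · simp only [pvAOuter, hP, List.filter_cons]
      rw [ih cur]
      simp

lemma pvAlt_eq_bOf (lines : List String) (index : Int) :
    find_layer_by_index_py_alt lines index =
      pvBOf lines ((List.range (lines.length - 1)).filter (pvLayerStart lines)) index := by
  rfl

-- ===== VERDICT (by name: the statement is the Claim_ definition above) =====
theorem find_layer_by_index_py_spec : Claim_equal_find_layer_by_index_py := by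
  intro lines index _
  unfold Spec_find_layer_by_index_py
  rw [pvAlt_eq_bOf]
  show pvAOuter lines index (List.range (lines.length - 1)) (-1) = _
  rw [pvAOuter_eq]
  congr 1
  omega
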